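-- pv_equiv track=rewrite | github.com/ElchaabiMohamed/InferCode_SVM | Du-42487-python-files/program_21709.py | swap_unique_keys_values
-- ===== SOURCE A (Python) =====
-- def swap_unique_keys_values(d):
-- 	store = {}
-- 	val = []
-- 	va = list(d.values())
-- 	for i in va:
-- 		val.append(i)
-- 	print (val)
-- 	for (k,v) in list(d.items()):
-- 		if va.count(v) == 1:
-- 			store[k]=v
-- 	return ({v:k for (k,v) in list(store.items())})
-- ===== SOURCE B (Python) =====
-- def swap_unique_keys_values(d):
--     print(list(d.values()))
--     inv = {}
--     dup = set()
--     for k, v in d.items():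
--         if v in dup:
--             continue
--         if v in inv:
--             del inv[v]
--             dup.add(v)
--         else:
--             inv[v] = k
--     return inv
-- ===== Notes on version B (the rewrite author's own statement) =====
-- stated objective: faster
-- what changed: B replaces A's count-filter-then-reinvert (a quadratic va.count scan per item plus two dict-building passes) with a single online pass that inverts value->key as it goes, deleting the earlier entry and blacklisting the value in a set when a duplicate value is seen.
import Mathlib
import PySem

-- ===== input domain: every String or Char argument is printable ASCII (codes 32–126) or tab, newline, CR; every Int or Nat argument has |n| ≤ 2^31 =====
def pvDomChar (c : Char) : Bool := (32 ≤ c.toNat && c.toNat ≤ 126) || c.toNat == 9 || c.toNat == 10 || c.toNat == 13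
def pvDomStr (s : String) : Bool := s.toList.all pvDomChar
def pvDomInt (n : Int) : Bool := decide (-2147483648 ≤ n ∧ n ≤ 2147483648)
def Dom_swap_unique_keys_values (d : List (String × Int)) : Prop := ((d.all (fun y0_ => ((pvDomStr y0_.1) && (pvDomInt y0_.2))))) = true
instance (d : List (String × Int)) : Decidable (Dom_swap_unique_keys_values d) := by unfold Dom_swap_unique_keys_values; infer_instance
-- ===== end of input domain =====

-- B replaces A's count-filter-then-reinvert (quadratic va.count scans plus two dict-building
-- passes) by a single online pass that inverts as it goes and deletes an entry when its value
-- recurs, blacklisting that value in a set; equivalence is about the return value (both Pythons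
-- also print list(d.values()), identically).

-- ===== PORT A =====
def swap_unique_keys_values (d : List (String × Int)) : List (Int × String) :=
  let dd := PySem.Dict.ofList d
  let va := dd.values
  -- `val` is built element by element and only printed; it does not affect the result
  let _val := va.foldl (fun acc i => acc ++ [i]) ([] : List Int)
  let store := dd.items.foldl
    (fun st kv => if va.count kv.2 = 1 then st.insert kv.1 kv.2 else st)
    (PySem.Dict.empty : PySem.Dict String Int)
  (store.items.foldl (fun r kv => r.insert kv.2 kv.1)
    (PySem.Dict.empty : PySem.Dict Int String)).items

-- ===== PORT B =====
-- the body of B's single loop: skip blacklisted values, delete+blacklist on a collision,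
-- otherwise record the inverted pair
def pvStepB (st : PySem.Dict Int String × PySem.Set Int) (kv : String × Int) :
    PySem.Dict Int String × PySem.Set Int :=
  if st.2.contains kv.2 then st
  else if st.1.contains kv.2 then (st.1.erase kv.2, st.2.add kv.2)
  else (st.1.insert kv.2 kv.1, st.2)

def swap_unique_keys_values_alt (d : List (String × Int)) : List (Int × String) :=
  let dd := PySem.Dict.ofList d
  let _vals := dd.values   -- printed
  (dd.items.foldl pvStepB
    ((PySem.Dict.empty : PySem.Dict Int String), (PySem.Set.empty : PySem.Set Int))).1.items

-- ===== PRECONDITION & SPEC =====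
def Spec_swap_unique_keys_values (d : List (String × Int)) (out : List (Int × String)) : Prop := out = swap_unique_keys_values_alt d
instance (d : List (String × Int)) (out : List (Int × String)) : Decidable (Spec_swap_unique_keys_values d out) := by unfold Spec_swap_unique_keys_values; infer_instance

-- ===== CLAIM (what is proved, stated in full; the proofs are below) =====
def Claim_equal_swap_unique_keys_values : Prop := ∀ (d : List (String × Int)), Dom_swap_unique_keys_values d → Spec_swap_unique_keys_values d (swap_unique_keys_values d)

-- ===== LEMMAS AND PROOFS =====

-- a fold that conditionally updates equals the unconditional fold over the filtered list
theorem foldl_if_filter {α β : Type} (p : α → Bool) (f : β → α → β) (xs : List α) (b : β) :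
    xs.foldl (fun s x => if p x then f s x else s) b = (xs.filter p).foldl f b := by
  induction xs generalizing b with
  | nil => rfl
  | cons x xs ih =>
    simp only [List.foldl_cons, List.filter_cons]
    by_cases h : p x <;> simp [h, ih]

-- fold-inserting a list of pairs with fresh, distinct keys into the empty dict yields that list
theorem items_foldl_insert_pairs {κ ν : Type} [BEq κ] [LawfulBEq κ]
    (xs : List (κ × ν)) (hnd : (xs.map (·.1)).Nodup) :
    ((xs.foldl (fun r kv => r.insert kv.1 kv.2)
        (PySem.Dict.empty : PySem.Dict κ ν)).items) = xs := by
  have h := PySem.Dict.items_foldl_insert_fresh (l := xs) (k := (·.1)) (v := (·.2))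
    (d := (PySem.Dict.empty : PySem.Dict κ ν))
    (by intro a _; simp [PySem.Dict.contains_empty]) hnd
  simpa using h

-- a value is among the values of the unique-filtered list iff it occurs exactly once
theorem mem_filter_count_iff (P : List (String × Int)) (v : Int) :
    (v ∈ (P.filter (fun kv => decide ((P.map (·.2)).count kv.2 = 1))).map (·.2))
      ↔ (P.map (·.2)).count v = 1 := by
  constructor
  · rintro h
    obtain ⟨kv, hkv, hv⟩ := List.mem_map.mp h
    have := List.of_mem_filter hkv
    subst hv
    exact of_decide_eq_true this
  · intro h
    have hm : v ∈ P.map (·.2) := by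
      rw [← List.count_pos_iff]; omega
    obtain ⟨kv, hkv, hv⟩ := List.mem_map.mp hm
    exact List.mem_map.mpr ⟨kv, List.mem_filter.mpr ⟨hkv, by simp [hv, h]⟩, hv⟩

-- the invariant of B's single pass: the inverse dict holds exactly the swapped uniquely-valued
-- pairs of the processed prefix, and the blacklist holds exactly the values seen at least twice
theorem pvInvB (P : List (String × Int)) :
    (P.foldl pvStepB ((PySem.Dict.empty : PySem.Dict Int String), (PySem.Set.empty : PySem.Set Int))).1.items
        = (P.filter (fun kv => decide ((P.map (·.2)).count kv.2 = 1))).map (fun kv => (kv.2, kv.1))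
    ∧ ∀ v : Int,
      (P.foldl pvStepB ((PySem.Dict.empty : PySem.Dict Int String), (PySem.Set.empty : PySem.Set Int))).2.contains v
        = decide (2 ≤ (P.map (·.2)).count v) := by
  induction P using List.reverseRecOn with
  | nil =>
    constructor
    · rfl
    · intro v; rfl
  | append_singleton P x ih =>
    obtain ⟨ih1, ih2⟩ := ih
    set st := P.foldl pvStepB ((PySem.Dict.empty : PySem.Dict Int String), (PySem.Set.empty : PySem.Set Int)) with hst
    rw [List.foldl_append, List.foldl_cons, List.foldl_nil]
    have hcnt : ∀ v : Int, ((P ++ [x]).map (·.2)).count v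
        = (P.map (·.2)).count v + if x.2 = v then 1 else 0 := by
      intro v
      simp only [List.map_append, List.count_append, List.map_cons, List.map_nil,
        List.count_cons, List.count_nil, beq_iff_eq]
      split_ifs <;> omega
    have hinvc : st.1.contains x.2 = decide ((P.map (·.2)).count x.2 = 1) := by
      rw [PySem.Dict.contains_eq_decide_mem_keys]
      have hk : st.1.keys = (P.filter (fun kv => decide ((P.map (·.2)).count kv.2 = 1))).map (·.2) := by
        show st.1.items.map (·.1) = _
        rw [ih1, List.map_map]
        rfl
      rw [hk]
      by_cases h : (P.map (·.2)).count x.2 = 1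
      · simp [(mem_filter_count_iff P x.2).mpr h, h]
      · simp only [h, decide_false, decide_eq_false_iff_not]
        exact fun hm => h ((mem_filter_count_iff P x.2).mp hm)
    by_cases hd : st.2.contains x.2 = true
    · -- value already blacklisted: count in P ≥ 2
      have hc2 : 2 ≤ (P.map (·.2)).count x.2 := by
        have := ih2 x.2
        rw [hd] at this
        exact of_decide_eq_true this.symm
      rw [pvStepB, if_pos hd]
      constructor
      · rw [ih1, List.filter_append]
        have hx : List.filter (fun kv => decide (((P ++ [x]).map (·.2)).count kv.2 = 1)) [x] = [] := by
          have h0 : (P.map (·.2)).count x.2 ≠ 0 := by omega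
          simp [h0]
        rw [hx, List.append_nil]
        congr 1
        apply List.filter_congr
        intro kv hkv
        rw [hcnt kv.2]
        by_cases hv : x.2 = kv.2
        · have : 2 ≤ (P.map (·.2)).count kv.2 := hv ▸ hc2
          simp only [if_pos hv]
          have h2 : ¬ ((P.map (·.2)).count kv.2 = 1) := by omega
          have h0 : (P.map (·.2)).count kv.2 ≠ 0 := by omega
          simp [h2, h0]
        · simp [if_neg hv]
      · intro v
        rw [ih2 v, hcnt v]
        by_cases hv : x.2 = v
        · have : 2 ≤ (P.map (·.2)).count v := hv ▸ hc2
          simp only [if_pos hv]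
          have h1 : 2 ≤ (P.map (·.2)).count v + 1 := by omega
          simp [this, h1]
        · simp [if_neg hv]
    · by_cases hi : st.1.contains x.2 = true
      · -- first collision: the value occurred exactly once in P
        have hc1 : (P.map (·.2)).count x.2 = 1 := by
          rw [hinvc] at hi
          exact of_decide_eq_true hi
        rw [pvStepB, if_neg hd, if_pos hi]
        constructor
        · show (st.1.erase x.2).items = _
          have herase : (st.1.erase x.2).items = st.1.items.filter (fun p => !(p.1 == x.2)) := rfl
          rw [herase, ih1, List.filter_map]
          rw [List.filter_append]
          have hx : List.filter (fun kv => decide (((P ++ [x]).map (·.2)).count kv.2 = 1)) [x] = [] := by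
            have h0 : (P.map (·.2)).count x.2 ≠ 0 := by omega
            simp [h0]
          rw [hx, List.append_nil, List.filter_filter]
          congr 1
          apply List.filter_congr
          intro kv hkv
          rw [hcnt kv.2]
          by_cases hv : x.2 = kv.2
          · simp [Function.comp, ← hv, hc1]
          · simp [Function.comp, hv, Ne.symm hv]
        · intro v
          show (st.2.add x.2).contains v = _
          have hadd : st.2.add x.2 = st.2 ++ [x.2] := by
            unfold PySem.Set.add
            rw [if_neg hd]
          rw [hcnt v, hadd]
          show List.contains (st.2 ++ [x.2]) v = _
          rw [List.contains_append]
          rw [show List.contains st.2 v = st.2.contains v from rfl, ih2 v]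
          by_cases hv : x.2 = v
          · subst hv
            simp [hc1]
          · simp [hv, Ne.symm hv]
      · -- fresh value: count 0 in P
        have hc0 : (P.map (·.2)).count x.2 = 0 := by
          rw [hinvc] at hi
          have h1 : ¬ ((P.map (·.2)).count x.2 = 1) := by
            intro h; exact hi (by simp [h])
          have h2 : ¬ (2 ≤ (P.map (·.2)).count x.2) := by
            intro h
            apply hd
            rw [ih2 x.2]
            simpa using h
          omega
        have hnotmem : x.2 ∉ P.map (·.2) := by
          rw [← List.count_eq_zero]; exact hc0
        rw [pvStepB, if_neg hd, if_neg hi]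
        constructor
        · show (st.1.insert x.2 x.1).items = _
          rw [PySem.Dict.items_insert_of_not_contains _ _ (Bool.eq_false_iff.mpr hi), ih1]
          rw [List.filter_append]
          have hx : List.filter (fun kv => decide (((P ++ [x]).map (·.2)).count kv.2 = 1)) [x]
              = [x] := by
            simp [hc0]
          rw [hx, List.map_append]
          congr 2
          apply List.filter_congr
          intro kv hkv
          rw [hcnt kv.2]
          have hv : x.2 ≠ kv.2 := by
            intro h
            exact hnotmem (h ▸ List.mem_map.mpr ⟨kv, hkv, rfl⟩)
          simp [if_neg hv]
        · intro v
          show st.2.contains v = _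
          rw [ih2 v, hcnt v]
          by_cases hv : x.2 = v
          · subst hv
            simp [hc0]
          · simp [if_neg hv]

-- ===== VERDICT (by name: the statement is the Claim_ definition above) =====
theorem swap_unique_keys_values_spec : Claim_equal_swap_unique_keys_values := by
  intro d _
  unfold Spec_swap_unique_keys_values swap_unique_keys_values swap_unique_keys_values_alt
  simp only []
  set L := (PySem.Dict.ofList d).items with hL
  have hkeys : (L.map (·.1)).Nodup := PySem.Dict.nodup_keys_ofList d
  set va := (PySem.Dict.ofList d).values with hva
  have hvaL : va = L.map (·.2) := rfl
  -- A's store-building loop is a filter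
  have hstoreItems :
      ((L.foldl (fun st kv => if va.count kv.2 = 1 then st.insert kv.1 kv.2 else st)
          (PySem.Dict.empty : PySem.Dict String Int)).items)
        = L.filter (fun kv => decide (va.count kv.2 = 1)) := by
    have h1 : (L.foldl (fun st kv => if va.count kv.2 = 1 then st.insert kv.1 kv.2 else st)
          (PySem.Dict.empty : PySem.Dict String Int))
        = ((L.filter (fun kv => decide (va.count kv.2 = 1))).foldl
            (fun st kv => st.insert kv.1 kv.2) PySem.Dict.empty) := by
      rw [← foldl_if_filter]
      simp
    rw [h1]
    exact items_foldl_insert_pairs _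
      (hkeys.sublist ((List.filter_sublist (l := L)).map (·.1)))
  -- the filtered pairs have pairwise-distinct values
  have hvalsnd : ((L.filter (fun kv => decide (va.count kv.2 = 1))).map (·.2)).Nodup := by
    rw [List.nodup_iff_count_le_one]
    intro a
    by_cases hmem : a ∈ (L.filter (fun kv => decide (va.count kv.2 = 1))).map (·.2)
    · obtain ⟨kv, hkv, hkva⟩ := List.mem_map.mp hmem
      have hp := List.of_mem_filter hkv
      have hcount : va.count a = 1 := by
        subst hkva; exact of_decide_eq_true hp
      calc ((L.filter (fun kv => decide (va.count kv.2 = 1))).map (·.2)).count a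
          ≤ (L.map (·.2)).count a :=
            ((List.filter_sublist (l := L)).map (·.2)).count_le a
        _ = 1 := by rw [← hvaL]; exact hcount
    · simp [List.count_eq_zero_of_not_mem hmem]
  -- A's final dict-building fold appends fresh keys, yielding the swapped filtered list
  have hswapA :
      (((L.filter (fun kv => decide (va.count kv.2 = 1))).foldl
          (fun r kv => r.insert kv.2 kv.1)
          (PySem.Dict.empty : PySem.Dict Int String)).items)
        = (L.filter (fun kv => decide (va.count kv.2 = 1))).map (fun kv => (kv.2, kv.1)) := by
    have h := PySem.Dict.items_foldl_insert_fresh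
      (l := L.filter (fun kv => decide (va.count kv.2 = 1)))
      (k := (·.2)) (v := (·.1)) (d := (PySem.Dict.empty : PySem.Dict Int String))
      (by intro a _; simp [PySem.Dict.contains_empty]) hvalsnd
    simpa using h
  rw [hstoreItems, hswapA, (pvInvB L).1, hvaL]
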